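-- pv_equiv track=rewrite | github.com/PaulMineau/SOMA_Foundation | soma/autoresearcher/fetcher.py | _guess_study_type_from_pubtype
-- ===== SOURCE A (Python) =====
-- def _guess_study_type_from_pubtype(pubtypes: list[str]) -> str:
--     """Map PubMed publication types to our study type taxonomy."""
--     pubtypes_lower = [pt.lower() for pt in pubtypes]
--     if any("meta-analysis" in pt for pt in pubtypes_lower):
--         return "meta-analysis"
--     if any("randomized controlled trial" in pt for pt in pubtypes_lower):
--         return "RCT"
--     if any("review" in pt for pt in pubtypes_lower):
--         return "review"
--     if any("case reports" in pt for pt in pubtypes_lower):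
--         return "case"
--     if any("observational" in pt for pt in pubtypes_lower):
--         return "observational"
--     return "unknown"
-- ===== SOURCE B (Python) =====
-- _TABLE = [
--     ("meta-analysis", "meta-analysis"),
--     ("randomized controlled trial", "RCT"),
--     ("review", "review"),
--     ("case reports", "case"),
--     ("observational", "observational"),
-- ]
--
--
-- def _guess_study_type_from_pubtype(pubtypes: list[str]) -> str:
--     """Single pass over pubtypes, tracking the best (lowest) matching priority."""
--     best = len(_TABLE)
--     for pt in pubtypes:
--         low = pt.lower()
--         for i in range(best):
--             if _TABLE[i][0] in low:
--                 best = i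
--                 break
--     return _TABLE[best][1] if best < len(_TABLE) else "unknown"
-- ===== Notes on version B (the rewrite author's own statement) =====
-- stated objective: alternative
-- what changed: Replaced A's five sequential any() scans over the whole lowercased list by a single pass over the pubtypes that tracks the best (lowest) matching priority index in a keyword table, with an early-break inner scan capped at the current best.
import Mathlib
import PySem

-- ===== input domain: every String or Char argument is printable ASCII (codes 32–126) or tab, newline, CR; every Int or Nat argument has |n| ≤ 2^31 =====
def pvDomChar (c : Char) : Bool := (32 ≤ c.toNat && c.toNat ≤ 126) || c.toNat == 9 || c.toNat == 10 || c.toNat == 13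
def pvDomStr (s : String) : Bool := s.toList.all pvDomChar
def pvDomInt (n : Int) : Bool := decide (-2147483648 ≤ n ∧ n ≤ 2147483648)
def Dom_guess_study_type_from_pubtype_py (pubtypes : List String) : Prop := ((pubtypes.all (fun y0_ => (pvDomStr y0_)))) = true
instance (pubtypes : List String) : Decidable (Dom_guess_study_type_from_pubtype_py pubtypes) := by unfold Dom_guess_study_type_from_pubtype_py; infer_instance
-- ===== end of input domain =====

-- B replaces A's five sequential full scans by one pass over the pubtypes that tracks
-- the best (lowest) matching priority index (objective: alternative decomposition).

-- ===== PORT A =====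
def guess_study_type_from_pubtype_py (pubtypes : List String) : String :=
  let pubtypes_lower := pubtypes.map PySem.Str.lower
  if pubtypes_lower.any (fun pt => PySem.Str.isIn "meta-analysis" pt) then "meta-analysis"
  else if pubtypes_lower.any (fun pt => PySem.Str.isIn "randomized controlled trial" pt) then "RCT"
  else if pubtypes_lower.any (fun pt => PySem.Str.isIn "review" pt) then "review"
  else if pubtypes_lower.any (fun pt => PySem.Str.isIn "case reports" pt) then "case"
  else if pubtypes_lower.any (fun pt => PySem.Str.isIn "observational" pt) then "observational"
  else "unknown"

-- ===== PORT B =====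
def pvTable : List (String × String) :=
  [("meta-analysis", "meta-analysis"),
   ("randomized controlled trial", "RCT"),
   ("review", "review"),
   ("case reports", "case"),
   ("observational", "observational")]

-- `for i in range(best): if _TABLE[i][0] in low: best = i; break`
def pvBestOf (low : String) (best : Nat) : Nat :=
  (((List.range best).find? (fun i => PySem.Str.isIn (pvTable.getD i ("", "")).1 low))).getD best

def guess_study_type_from_pubtype_py_alt (pubtypes : List String) : String :=
  let best := pubtypes.foldl (fun best pt => pvBestOf (PySem.Str.lower pt) best) pvTable.length
  if best < pvTable.length then (pvTable.getD best ("", "")).2 else "unknown"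

-- ===== PRECONDITION & SPEC =====
def Spec_guess_study_type_from_pubtype_py (pubtypes : List String) (out : String) : Prop := out = guess_study_type_from_pubtype_py_alt pubtypes
instance (pubtypes : List String) (out : String) : Decidable (Spec_guess_study_type_from_pubtype_py pubtypes out) := by unfold Spec_guess_study_type_from_pubtype_py; infer_instance

-- ===== CLAIM (what is proved, stated in full; the proofs are below) =====
def Claim_equal_guess_study_type_from_pubtype_py : Prop := ∀ (pubtypes : List String), Dom_guess_study_type_from_pubtype_py pubtypes → Spec_guess_study_type_from_pubtype_py pubtypes (guess_study_type_from_pubtype_py pubtypes)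

-- ===== LEMMAS AND PROOFS =====

-- the keyword check at priority index i
def pvChk (i : Nat) (low : String) : Bool := PySem.Str.isIn (pvTable.getD i ("", "")).1 low

-- characterisation of the inner break-loop: the result is ≤ the cap, nothing
-- strictly below it matches, and if it is below the cap it matches.
theorem find_range_getD (p : Nat → Bool) (b : Nat) :
    (((List.range b).find? p).getD b) ≤ b ∧
    (∀ i < (((List.range b).find? p).getD b), p i = false) ∧
    ((((List.range b).find? p).getD b) < b → p (((List.range b).find? p).getD b) = true) := by
  induction b with
  | zero => simp
  | succ b ih =>
    rw [List.range_succ, List.find?_append]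
    cases h : (List.range b).find? p with
    | some j =>
      rw [h] at ih
      simp only [Option.some_or, Option.getD_some] at ih ⊢
      have hj : j ∈ List.range b := List.mem_of_find?_eq_some h
      have hjb : j < b := List.mem_range.mp hj
      exact ⟨Nat.le_of_lt (Nat.lt_succ_of_lt hjb),
        fun i hi => ih.2.1 i hi,
        fun _ => by
          have := List.find?_some h
          simpa using this⟩
    | none =>
      have hnone : ∀ i < b, p i = false := by
        intro i hi
        have := List.find?_eq_none.mp h i (List.mem_range.mpr hi)
        simpa using this
      simp only [Option.none_or]
      by_cases hb : p b = true
      · simp only [List.find?_cons, hb]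
        refine ⟨Nat.le_succ b, ?_, fun _ => hb⟩
        intro i hi; exact hnone i hi
      · have hb' : p b = false := by simpa using hb
        simp only [List.find?_cons, hb']
        refine ⟨Nat.le_refl _, ?_, fun h' => absurd h' (Nat.lt_irrefl _)⟩
        intro i hi
        rcases Nat.lt_succ_iff_lt_or_eq.mp hi with h' | h'
        · exact hnone i h'
        · subst h'; exact hb'

theorem pvBestOf_char (low : String) (b : Nat) :
    pvBestOf low b ≤ b ∧
    (∀ i < pvBestOf low b, pvChk i low = false) ∧
    (pvBestOf low b < b → pvChk (pvBestOf low b) low = true) :=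
  find_range_getD (fun i => pvChk i low) b

-- invariant of the outer single pass
theorem fold_char (l : List String) : ∀ b : Nat,
    (l.foldl (fun best pt => pvBestOf (PySem.Str.lower pt) best) b) ≤ b ∧
    (∀ i < (l.foldl (fun best pt => pvBestOf (PySem.Str.lower pt) best) b),
       ∀ pt ∈ l, pvChk i (PySem.Str.lower pt) = false) ∧
    ((l.foldl (fun best pt => pvBestOf (PySem.Str.lower pt) best) b) < b →
       ∃ pt ∈ l, pvChk (l.foldl (fun best pt => pvBestOf (PySem.Str.lower pt) best) b) (PySem.Str.lower pt) = true) := by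
  induction l with
  | nil => intro b; simp
  | cons pt rest ih =>
    intro b
    simp only [List.foldl_cons]
    set b' := pvBestOf (PySem.Str.lower pt) b with hb'
    obtain ⟨hle1, hbelow1, hmatch1⟩ := pvBestOf_char (PySem.Str.lower pt) b
    obtain ⟨hle2, hbelow2, hmatch2⟩ := ih b'
    set r := rest.foldl (fun best pt => pvBestOf (PySem.Str.lower pt) best) b' with hr
    refine ⟨Nat.le_trans hle2 hle1, ?_, ?_⟩
    · intro i hi q hq
      rcases List.mem_cons.mp hq with h | h
      · subst h; exact hbelow1 i (Nat.lt_of_lt_of_le hi hle2)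
      · exact hbelow2 i hi q h
    · intro hrb
      by_cases hlt : r < b'
      · obtain ⟨q, hq, hc⟩ := hmatch2 hlt
        exact ⟨q, List.mem_cons_of_mem _ hq, hc⟩
      · have : r = b' := Nat.le_antisymm hle2 (Nat.le_of_not_lt hlt)
        refine ⟨pt, List.mem_cons_self .., ?_⟩
        rw [this]
        exact hmatch1 (by omega)

theorem any_lower_eq (pubtypes : List String) (i : Nat) :
    ((pubtypes.map PySem.Str.lower).any (fun low => pvChk i low) = true) ↔
    (∃ pt ∈ pubtypes, pvChk i (PySem.Str.lower pt) = true) := by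
  simp [List.any_eq_true]

-- ===== VERDICT (by name: the statement is the Claim_ definition above) =====
set_option maxHeartbeats 1000000 in
theorem guess_study_type_from_pubtype_py_spec : Claim_equal_guess_study_type_from_pubtype_py := by
  unfold Claim_equal_guess_study_type_from_pubtype_py
  intro pubtypes _
  unfold Spec_guess_study_type_from_pubtype_py
  unfold guess_study_type_from_pubtype_py guess_study_type_from_pubtype_py_alt
  simp only []
  set r := pubtypes.foldl (fun best pt => pvBestOf (PySem.Str.lower pt) best) pvTable.length with hrdef
  obtain ⟨hle, hbelow, hmatch⟩ := fold_char pubtypes pvTable.length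
  rw [← hrdef] at hle hbelow hmatch
  have hlen : pvTable.length = 5 := by decide
  have Q : ∀ i : Nat, Prop := fun i => ∃ pt ∈ pubtypes, pvChk i (PySem.Str.lower pt) = true
  -- translate A's five `any` tests into pvChk form
  have hA0 : (pubtypes.map PySem.Str.lower).any (fun pt => PySem.Str.isIn "meta-analysis" pt)
      = (pubtypes.map PySem.Str.lower).any (fun low => pvChk 0 low) := rfl
  have hA1 : (pubtypes.map PySem.Str.lower).any (fun pt => PySem.Str.isIn "randomized controlled trial" pt)
      = (pubtypes.map PySem.Str.lower).any (fun low => pvChk 1 low) := rfl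
  have hA2 : (pubtypes.map PySem.Str.lower).any (fun pt => PySem.Str.isIn "review" pt)
      = (pubtypes.map PySem.Str.lower).any (fun low => pvChk 2 low) := rfl
  have hA3 : (pubtypes.map PySem.Str.lower).any (fun pt => PySem.Str.isIn "case reports" pt)
      = (pubtypes.map PySem.Str.lower).any (fun low => pvChk 3 low) := rfl
  have hA4 : (pubtypes.map PySem.Str.lower).any (fun pt => PySem.Str.isIn "observational" pt)
      = (pubtypes.map PySem.Str.lower).any (fun low => pvChk 4 low) := rfl
  rw [hA0, hA1, hA2, hA3, hA4]
  have hrval : ∀ k : Nat, k < 5 →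
      (∃ pt ∈ pubtypes, pvChk k (PySem.Str.lower pt) = true) →
      (∀ j < k, ¬ ∃ pt ∈ pubtypes, pvChk j (PySem.Str.lower pt) = true) → r = k := by
    intro k hk5 ⟨pt, hpt, hc⟩ hnone
    have hk : ¬ k < r := by
      intro hlt
      have := hbelow k hlt pt hpt
      rw [hc] at this; exact absurd this (by decide)
    have hr : ¬ r < k := by
      intro hlt
      have hrl : r < pvTable.length := by omega
      obtain ⟨q, hq, hcq⟩ := hmatch hrl
      exact hnone r hlt ⟨q, hq, hcq⟩
    omega
  by_cases h0 : ∃ pt ∈ pubtypes, pvChk 0 (PySem.Str.lower pt) = true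
  · have ht := (any_lower_eq pubtypes 0).mpr h0
    have hr : r = 0 := hrval 0 (by omega) h0 (by omega)
    rw [hr, hlen]; simp only [ht]; norm_num [pvTable]
  · have h0' : (pubtypes.map PySem.Str.lower).any (fun low => pvChk 0 low) = false := by
      rw [← Bool.not_eq_true]; intro h; exact h0 ((any_lower_eq pubtypes 0).mp h)
    simp only [h0', Bool.false_eq_true, if_false]
    by_cases h1 : ∃ pt ∈ pubtypes, pvChk 1 (PySem.Str.lower pt) = true
    · have ht := (any_lower_eq pubtypes 1).mpr h1
      have hr : r = 1 := hrval 1 (by omega) h1 (by intro j hj; interval_cases j; exact h0)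
      rw [hr, hlen]; simp only [ht]; norm_num [pvTable]
    · have h1' : (pubtypes.map PySem.Str.lower).any (fun low => pvChk 1 low) = false := by
        rw [← Bool.not_eq_true]; intro h; exact h1 ((any_lower_eq pubtypes 1).mp h)
      simp only [h1', Bool.false_eq_true, if_false]
      by_cases h2 : ∃ pt ∈ pubtypes, pvChk 2 (PySem.Str.lower pt) = true
      · have ht := (any_lower_eq pubtypes 2).mpr h2
        have hr : r = 2 := hrval 2 (by omega) h2 (by intro j hj; interval_cases j; exacts [h0, h1])
        rw [hr, hlen]; simp only [ht]; norm_num [pvTable]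
      · have h2' : (pubtypes.map PySem.Str.lower).any (fun low => pvChk 2 low) = false := by
          rw [← Bool.not_eq_true]; intro h; exact h2 ((any_lower_eq pubtypes 2).mp h)
        simp only [h2', Bool.false_eq_true, if_false]
        by_cases h3 : ∃ pt ∈ pubtypes, pvChk 3 (PySem.Str.lower pt) = true
        · have ht := (any_lower_eq pubtypes 3).mpr h3
          have hr : r = 3 := hrval 3 (by omega) h3 (by intro j hj; interval_cases j; exacts [h0, h1, h2])
          rw [hr, hlen]; simp only [ht]; norm_num [pvTable]
        · have h3' : (pubtypes.map PySem.Str.lower).any (fun low => pvChk 3 low) = false := by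
            rw [← Bool.not_eq_true]; intro h; exact h3 ((any_lower_eq pubtypes 3).mp h)
          simp only [h3', Bool.false_eq_true, if_false]
          by_cases h4 : ∃ pt ∈ pubtypes, pvChk 4 (PySem.Str.lower pt) = true
          · have ht := (any_lower_eq pubtypes 4).mpr h4
            have hr : r = 4 := hrval 4 (by omega) h4 (by intro j hj; interval_cases j; exacts [h0, h1, h2, h3])
            rw [hr, hlen]; simp only [ht]; norm_num [pvTable]
          · have h4' : (pubtypes.map PySem.Str.lower).any (fun low => pvChk 4 low) = false := by
              rw [← Bool.not_eq_true]; intro h; exact h4 ((any_lower_eq pubtypes 4).mp h)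
            simp only [h4', Bool.false_eq_true, if_false]
            have hr5 : r = 5 := by
              by_contra hne
              obtain ⟨q, hq, hc⟩ := hmatch (by omega)
              have hlt : r < 5 := by omega
              interval_cases r
              · exact absurd ⟨q, hq, hc⟩ h0
              · exact absurd ⟨q, hq, hc⟩ h1
              · exact absurd ⟨q, hq, hc⟩ h2
              · exact absurd ⟨q, hq, hc⟩ h3
              · exact absurd ⟨q, hq, hc⟩ h4
            rw [hr5, hlen]; norm_num
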